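-- pv_equiv track=rewrite | github.com/clbarnes/connectome_data | connectome_data/utils.py | unpad_name
-- ===== SOURCE A (Python) =====
-- def unpad_name(s: str) -> str:
--     s = s.strip()
--     out = ''
--     this_element = ''
--     is_digit = s[0].isdigit()
--
--     for next_char in s:
--         next_is_digit = next_char.isdigit()
--         if next_is_digit != is_digit:
--             this_element = unpad_element(this_element)
--             out += this_element
--             this_element = ''
--             is_digit = next_is_digit
--         this_element += next_char
--
--     this_element = unpad_element(this_element)
--     out += this_element
--     return out
--
-- def unpad_element(s: str) -> str:
--     if s.isdigit():
--         s = str(int(s))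
--     return s
-- ===== SOURCE B (Python) =====
-- def unpad_name(s: str) -> str:
--     """Split the stripped string into maximal digit/non-digit runs, normalizing
--     each digit run via int, instead of A's per-character flag/accumulator loop."""
--     s = s.strip()
--     parts = []
--     while s:
--         d = s[0].isdigit()
--         i = 1
--         while i < len(s) and s[i].isdigit() == d:
--             i += 1
--         run = s[:i]
--         parts.append(str(int(run)) if d else run)
--         s = s[i:]
--     return ''.join(parts)
-- ===== Notes on version B (the rewrite author's own statement) =====
-- stated objective: alternative
-- what changed: Replaces A's per-character flag/accumulator state machine by a loop that splits off the leading maximal digit/non-digit run each step and normalizes digit runs directly with int; Pre_ excludes empty/all-whitespace inputs, on which A raises IndexError (s[0] of the stripped string).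
import Mathlib
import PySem

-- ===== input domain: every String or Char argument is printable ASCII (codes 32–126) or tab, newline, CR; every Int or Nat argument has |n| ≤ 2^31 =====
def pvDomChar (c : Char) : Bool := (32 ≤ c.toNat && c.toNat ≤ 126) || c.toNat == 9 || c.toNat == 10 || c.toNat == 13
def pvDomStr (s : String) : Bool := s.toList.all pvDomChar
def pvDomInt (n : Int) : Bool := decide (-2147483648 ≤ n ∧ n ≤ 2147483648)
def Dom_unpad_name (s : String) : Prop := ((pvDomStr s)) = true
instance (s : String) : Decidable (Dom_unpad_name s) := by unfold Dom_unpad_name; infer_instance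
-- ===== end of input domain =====

-- B replaces A's per-character flag/accumulator state machine by a loop that splits off the
-- leading maximal digit/non-digit run each step (alternative decomposition, same cost).

-- ===== PORT A =====
-- unpad_element: if s.isdigit(): s = str(int(s)).  (int(s) is guarded by isdigit, so the
-- none branch of ofChars? is unreachable on the admitted ASCII domain.)
def unpadElementA (cs : List Char) : List Char :=
  if PySem.Chars.strIsdigit cs then
    match PySem.Int.ofChars? cs with
    | some n => PySem.Int.toChars n
    | none => cs
  else cs

-- one iteration of A's for-loop; state = (out, this_element, is_digit)
def stepA (st : List Char × List Char × Bool) (nc : Char) : List Char × List Char × Bool :=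
  let nd := PySem.Chars.isdigit nc
  if nd != st.2.2 then
    (st.1 ++ unpadElementA st.2.1, [nc], nd)
  else
    (st.1, st.2.1 ++ [nc], st.2.2)

def unpad_name (s : String) : String :=
  let cs := PySem.Chars.strip s.toList
  match PySem.List.pyGet? cs 0 with
  | none => ""   -- Python raises IndexError here (s[0] on empty); excluded by Pre_unpad_name
  | some c0 =>
    let st := cs.foldl stepA ([], [], PySem.Chars.isdigit c0)
    String.ofList (st.1 ++ unpadElementA st.2.1)

-- ===== PORT B =====
-- str(int(run)) for a digit run
def digitsToCanon (cs : List Char) : List Char :=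
  match PySem.Int.ofChars? cs with
  | some n => PySem.Int.toChars n
  | none => cs

-- B's while-loop over the remaining string, as the obvious tail recursion
def unpadRuns (cs : List Char) : List Char :=
  match cs with
  | [] => []
  | c :: rest =>
    let d := PySem.Chars.isdigit c
    let run := c :: rest.takeWhile (fun x => PySem.Chars.isdigit x == d)
    let rest' := rest.dropWhile (fun x => PySem.Chars.isdigit x == d)
    (if d then digitsToCanon run else run) ++ unpadRuns rest'
termination_by cs.length
decreasing_by
  simp only [List.length_cons]
  exact Nat.lt_succ_of_le (List.length_dropWhile_le _ _)

def unpad_name_alt (s : String) : String :=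
  String.ofList (unpadRuns (PySem.Chars.strip s.toList))

-- ===== PRECONDITION & SPEC =====
-- A evaluates s[0] on the stripped string, an IndexError when s strips to empty.
def Pre_unpad_name (s : String) : Prop := PySem.Chars.strip s.toList ≠ []
instance (s : String) : Decidable (Pre_unpad_name s) := by unfold Pre_unpad_name; infer_instance
def pvWitness_unpad_name : String := "ab007"

def Spec_unpad_name (s : String) (out : String) : Prop := out = unpad_name_alt s
instance (s : String) (out : String) : Decidable (Spec_unpad_name s out) := by unfold Spec_unpad_name; infer_instance

-- ===== CLAIM (what is proved, stated in full; the proofs are below) =====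
def Claim_equal_unpad_name : Prop := ∀ (s : String), Dom_unpad_name s → Pre_unpad_name s → Spec_unpad_name s (unpad_name s)

-- ===== LEMMAS AND PROOFS =====

-- every element of the takeWhile prefix has the digit-ness the predicate tests
lemma mem_tw {d : Bool} {l : List Char} {x : Char}
    (hx : x ∈ l.takeWhile (fun y => PySem.Chars.isdigit y == d)) :
    PySem.Chars.isdigit x = d :=
  eq_of_beq (List.mem_takeWhile_imp (p := fun y => PySem.Chars.isdigit y == d) (l := l) hx)

-- on a run whose tail agrees with the head's digit-ness, unpad_element is exactly B's normalization
lemma elem_run (c : Char) (tl : List Char)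
    (h : ∀ x ∈ tl, PySem.Chars.isdigit x = PySem.Chars.isdigit c) :
    unpadElementA (c :: tl) =
      if PySem.Chars.isdigit c then digitsToCanon (c :: tl) else c :: tl := by
  unfold unpadElementA digitsToCanon
  by_cases hd : PySem.Chars.isdigit c = true
  · have hs : PySem.Chars.strIsdigit (c :: tl) = true := by
      simp only [PySem.Chars.strIsdigit, List.isEmpty_cons, Bool.not_false, Bool.true_and,
        List.all_eq_true]
      intro x hx
      rcases List.mem_cons.mp hx with rfl | hx
      · exact hd
      · exact (h x hx).trans hd
    simp [hs, hd]
  · have hs : PySem.Chars.strIsdigit (c :: tl) = false := by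
      simp [PySem.Chars.strIsdigit, List.all_cons]
      exact fun h' => absurd h' hd
    simp [hs, hd]

-- invariant of A's fold: finishing the fold equals emitting the pending run and recursing on the rest
lemma foldA (l : List Char) : ∀ (out this : List Char) (d : Bool),
    (l.foldl stepA (out, this, d)).1 ++ unpadElementA (l.foldl stepA (out, this, d)).2.1
      = out ++ unpadElementA (this ++ l.takeWhile (fun x => PySem.Chars.isdigit x == d))
          ++ unpadRuns (l.dropWhile (fun x => PySem.Chars.isdigit x == d)) := by
  induction l with
  | nil => intro out this d; simp [unpadRuns]
  | cons c l ih =>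
    intro out this d
    by_cases hc : PySem.Chars.isdigit c = d
    · have hstep : stepA (out, this, d) c = (out, this ++ [c], d) := by
        simp [stepA, hc]
      simp only [List.foldl_cons, hstep, ih,
        List.takeWhile_cons, List.dropWhile_cons, hc, beq_self_eq_true, if_pos,
        List.append_assoc, List.cons_append, List.nil_append]
    · have hstep : stepA (out, this, d) c =
          (out ++ unpadElementA this, [c], PySem.Chars.isdigit c) := by
        simp [stepA, bne_iff_ne, hc]
      have htw : (c :: l).takeWhile (fun x => PySem.Chars.isdigit x == d) = [] := by
        simp [hc]
      have hdw : (c :: l).dropWhile (fun x => PySem.Chars.isdigit x == d) = c :: l := by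
        simp [hc]
      have hrun := elem_run c (l.takeWhile (fun x => PySem.Chars.isdigit x == PySem.Chars.isdigit c))
        (fun x hx => mem_tw hx)
      rw [List.foldl_cons, hstep, ih, htw, hdw]
      rw [unpadRuns]
      simp only [List.append_nil, List.append_assoc, List.cons_append, List.nil_append, ← hrun]

-- ===== VERDICT (by name: the statement is the Claim_ definition above) =====
theorem unpad_name_spec : Claim_equal_unpad_name := by
  intro s _ hpre
  unfold Spec_unpad_name unpad_name unpad_name_alt
  obtain ⟨c0, rest, hcs⟩ := List.exists_cons_of_ne_nil hpre
  rw [hcs]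
  have hget : PySem.List.pyGet? (c0 :: rest) (0 : Int) = some c0 := by
    simp [PySem.List.pyGet?, PySem.List.pyIdx?]
  simp only [hget]
  rw [unpadRuns]
  have := foldA (c0 :: rest) [] [] (PySem.Chars.isdigit c0)
  simp only [List.takeWhile_cons, List.dropWhile_cons, beq_self_eq_true, if_pos,
    List.nil_append] at this
  rw [this]
  have hrun := elem_run c0 (rest.takeWhile (fun x => PySem.Chars.isdigit x == PySem.Chars.isdigit c0))
    (fun x hx => mem_tw hx)
  rw [hrun]
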